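-- pv_equiv track=rewrite | github.com/SandaminiI/Safe-AI-Framework | backend/uml-gen-ai/llm_client.py | _inject_after_startuml
-- ===== SOURCE A (Python) =====
-- def _inject_after_startuml(plantuml: str, lines_to_inject: list) -> str:
--     result = []
--     injected = False
--     for line in plantuml.splitlines():
--         result.append(line)
--         if not injected and line.strip().lower().startswith("@startuml"):
--             for inject_line in lines_to_inject:
--                 if inject_line not in plantuml:
--                     result.append(inject_line)
--             injected = True
--     return "\n".join(result)
-- ===== SOURCE B (Python) =====
-- def _inject_after_startuml(plantuml: str, lines_to_inject: list) -> str: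
--     def go(lines):
--         # structural recursion: stop recursing at the first marker line
--         if not lines:
--             return []
--         head, rest = lines[0], lines[1:]
--         if head.strip().lower().startswith("@startuml"):
--             return [head] + [il for il in lines_to_inject if il not in plantuml] + rest
--         return [head] + go(rest)
--     return "\n".join(go(plantuml.splitlines()))
-- ===== Notes on version B (the rewrite author's own statement) =====
-- stated objective: alternative
-- what changed: Replaces A's iterative single-pass fold carrying a (result, injected-flag) accumulator by a flag-free structural recursion on the line list that terminates the recursion at the first marker line and returns the remaining lines verbatim.
import Mathlib
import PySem

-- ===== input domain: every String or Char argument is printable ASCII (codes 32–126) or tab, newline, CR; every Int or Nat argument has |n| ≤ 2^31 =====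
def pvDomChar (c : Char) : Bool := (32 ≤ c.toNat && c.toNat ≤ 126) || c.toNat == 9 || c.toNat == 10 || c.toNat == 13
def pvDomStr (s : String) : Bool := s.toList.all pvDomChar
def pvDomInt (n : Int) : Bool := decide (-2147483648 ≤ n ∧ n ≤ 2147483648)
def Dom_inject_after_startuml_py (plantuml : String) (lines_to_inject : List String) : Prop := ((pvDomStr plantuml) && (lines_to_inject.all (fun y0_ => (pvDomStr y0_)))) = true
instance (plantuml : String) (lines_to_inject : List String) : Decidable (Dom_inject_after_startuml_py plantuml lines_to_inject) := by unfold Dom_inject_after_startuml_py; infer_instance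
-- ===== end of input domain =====

-- ===== PORT A =====
-- B replaces A's iterative flag-carrying fold by a flag-free structural recursion that stops at the first marker line (alternative decomposition, same cost).
def inject_after_startuml_py (plantuml : String) (lines_to_inject : List String) : String :=
  PySem.Str.join "\n"
    ((PySem.Str.splitlines plantuml).foldl
      (fun (st : List String × Bool) line =>
        let result := st.1 ++ [line]
        if !st.2 && PySem.Str.startswith (PySem.Str.lower (PySem.Str.strip line)) "@startuml" then
          (lines_to_inject.foldl
            (fun r il => if !(PySem.Str.isIn il plantuml) then r ++ [il] else r) result, true)
        else (result, st.2))
      ([], false)).1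

-- ===== PORT B =====
def injectGo (plantuml : String) (lines_to_inject : List String) : List String → List String
  | [] => []
  | head :: rest =>
    if PySem.Str.startswith (PySem.Str.lower (PySem.Str.strip head)) "@startuml" then
      [head] ++ lines_to_inject.filter (fun il => !(PySem.Str.isIn il plantuml)) ++ rest
    else [head] ++ injectGo plantuml lines_to_inject rest

def inject_after_startuml_py_alt (plantuml : String) (lines_to_inject : List String) : String :=
  PySem.Str.join "\n" (injectGo plantuml lines_to_inject (PySem.Str.splitlines plantuml))

-- ===== PRECONDITION & SPEC =====
def Spec_inject_after_startuml_py (plantuml : String) (lines_to_inject : List String) (out : String) : Prop := out = inject_after_startuml_py_alt plantuml lines_to_inject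
instance (plantuml : String) (lines_to_inject : List String) (out : String) : Decidable (Spec_inject_after_startuml_py plantuml lines_to_inject out) := by unfold Spec_inject_after_startuml_py; infer_instance

-- ===== CLAIM (what is proved, stated in full; the proofs are below) =====
def Claim_equal_inject_after_startuml_py : Prop := ∀ (plantuml : String) (lines_to_inject : List String), Dom_inject_after_startuml_py plantuml lines_to_inject → Spec_inject_after_startuml_py plantuml lines_to_inject (inject_after_startuml_py plantuml lines_to_inject)

-- ===== LEMMAS AND PROOFS =====

-- A's loop body, with the injected block abstracted as 'extra' (proof helper).
def stepA (p : String → Bool) (extra : List String) (st : List String × Bool) (line : String) : List String × Bool :=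
  let result := st.1 ++ [line]
  if !st.2 && p line then (result ++ extra, true) else (result, st.2)

-- Once the flag is true, A's loop only appends the lines.
theorem loopA_true (p : String → Bool) (extra : List String) (lines acc : List String) :
    lines.foldl (stepA p extra) (acc, true) = (acc ++ lines, true) := by
  induction lines generalizing acc with
  | nil => simp
  | cons h t ih =>
    rw [List.foldl_cons, show stepA p extra (acc, true) h = (acc ++ [h], true) from rfl, ih]
    simp

-- A's flagged fold equals B's flag-free recursion.
theorem loopA_eq_go (plantuml : String) (inj : List String) (lines acc : List String) :
    (lines.foldl
      (stepA (fun ln => PySem.Str.startswith (PySem.Str.lower (PySem.Str.strip ln)) "@startuml")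
        (inj.filter (fun il => !(PySem.Str.isIn il plantuml)))) (acc, false)).1
    = acc ++ injectGo plantuml inj lines := by
  induction lines generalizing acc with
  | nil => simp [injectGo]
  | cons h t ih =>
    rw [List.foldl_cons]
    by_cases hp : PySem.Str.startswith (PySem.Str.lower (PySem.Str.strip h)) "@startuml" = true
    · rw [show stepA (fun ln => PySem.Str.startswith (PySem.Str.lower (PySem.Str.strip ln)) "@startuml")
          (inj.filter (fun il => !(PySem.Str.isIn il plantuml))) (acc, false) h
          = (acc ++ [h] ++ inj.filter (fun il => !(PySem.Str.isIn il plantuml)), true) by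
            simp only [stepA, Bool.not_false, Bool.true_and, hp, if_true]]
      rw [loopA_true]
      simp only [injectGo, hp, if_true]
      simp
    · rw [show stepA (fun ln => PySem.Str.startswith (PySem.Str.lower (PySem.Str.strip ln)) "@startuml")
          (inj.filter (fun il => !(PySem.Str.isIn il plantuml))) (acc, false) h
          = (acc ++ [h], false) by
            simp only [stepA, Bool.not_false, Bool.true_and]
            rw [if_neg hp]]
      rw [ih]
      simp only [injectGo]
      rw [if_neg hp]
      simp

-- ===== VERDICT (by name: the statement is the Claim_ definition above) =====
theorem inject_after_startuml_py_spec : Claim_equal_inject_after_startuml_py := by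
  intro plantuml lines_to_inject _
  unfold Spec_inject_after_startuml_py inject_after_startuml_py inject_after_startuml_py_alt
  have hfun :
      (fun (st : List String × Bool) line =>
        let result := st.1 ++ [line]
        if !st.2 && PySem.Str.startswith (PySem.Str.lower (PySem.Str.strip line)) "@startuml" then
          (lines_to_inject.foldl
            (fun r il => if !(PySem.Str.isIn il plantuml) then r ++ [il] else r) result, true)
        else (result, st.2)) =
      stepA (fun ln => PySem.Str.startswith (PySem.Str.lower (PySem.Str.strip ln)) "@startuml")
        (lines_to_inject.filter (fun il => !(PySem.Str.isIn il plantuml))) := by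
    funext st line
    simp only [stepA, PySem.List.foldl_append_if_eq_filter]
  rw [hfun, loopA_eq_go]
  simp
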